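-- pv_equiv track=rewrite | github.com/MatthyPlayz/r00btengine | ScreenManager.py | PlacePlayer
-- ===== SOURCE A (Python) =====
-- from math import floor, ceil
--
-- def findMiddle(input_list):
--     middle = float(len(input_list))/2
--     if middle % 2 != 0:
--         return ceil(middle - .5)
--     else:
--         return ceil(middle)
--
-- def PlacePlayer(sd, resw, resh):
--     lst = sd
--     tstr = []
--     b = 0
--     for i in lst[findMiddle(lst)-1]:
--         if i == lst[findMiddle(lst)-1][int(findMiddle(lst[findMiddle(lst)-1])/2)] and b == int(findMiddle(lst[findMiddle(lst)-1])/2)+2: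
--             tstr.append("@")
--         else:
--             tstr.append(i)
--         b+=1
--     lst[findMiddle(lst)-1] = tstr
--     return lst
-- ===== SOURCE B (Python) =====
-- from math import floor, ceil
--
-- def findMiddle(input_list):
--     middle = float(len(input_list))/2
--     if middle % 2 != 0:
--         return ceil(middle - .5)
--     else:
--         return ceil(middle)
--
-- def PlacePlayer(sd, resw, resh):
--     # Compute the target row and position once; copy the row and do one indexed
--     # write instead of rebuilding it element by element with a per-element test.
--     # Mutates sd in place, like the original.
--     mid = findMiddle(sd) - 1
--     row = sd[mid]
--     m = int(findMiddle(row) / 2)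
--     tstr = list(row)
--     if m + 2 < len(row) and row[m + 2] == row[m]:
--         tstr[m + 2] = "@"
--     sd[mid] = tstr
--     return sd
-- ===== Notes on version B (the rewrite author's own statement) =====
-- stated objective: simpler
-- what changed: Instead of rebuilding the middle row in a loop that tests every element (recomputing findMiddle for each), B copies the row once and performs a single guarded indexed write at the only position the loop's condition can ever fire (m+2).
-- outside the precondition, e.g. on PlacePlayer([], 0, 0): A raises IndexError, B raises IndexError
import Mathlib
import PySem

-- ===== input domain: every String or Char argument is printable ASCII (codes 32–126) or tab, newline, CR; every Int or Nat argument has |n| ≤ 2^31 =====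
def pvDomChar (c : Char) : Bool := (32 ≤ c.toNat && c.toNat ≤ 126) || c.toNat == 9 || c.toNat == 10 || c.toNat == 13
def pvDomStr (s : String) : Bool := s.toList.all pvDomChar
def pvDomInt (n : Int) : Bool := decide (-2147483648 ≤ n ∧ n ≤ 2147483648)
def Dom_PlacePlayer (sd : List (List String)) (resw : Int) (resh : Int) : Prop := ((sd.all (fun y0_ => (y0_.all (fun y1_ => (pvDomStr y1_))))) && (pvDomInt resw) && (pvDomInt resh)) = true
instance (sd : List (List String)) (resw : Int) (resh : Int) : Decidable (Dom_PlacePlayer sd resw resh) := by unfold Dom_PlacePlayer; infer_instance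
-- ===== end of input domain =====

-- B replaces A's element-by-element rebuilding loop (with its per-element findMiddle
-- recomputation and counter test) by one row copy and a single guarded indexed write;
-- objective: simpler. Both Pythons mutate sd in place identically (row replaced by a
-- fresh copy); the equivalence proved is about the return value.


-- ===== PORT A =====
-- findMiddle, shared verbatim by both Pythons. float(len)/2 is exactly representable, so
-- the float branch 'middle % 2 != 0' is (2*middle) % 4 ≠ 0 i.e. len % 4 ≠ 0 over the ints,
-- and ceil(middle) = ⌈len/2⌉, ceil(middle - .5) = ⌈(len-1)/2⌉, via ⌈a/2⌉ = -((-a)//2): exact.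
def pvFindMiddle {α : Type} (l : List α) : Int :=
  if ((l.length : Int)) % 4 ≠ 0 then
    -(PySem.Int.floordiv (-((l.length : Int) - 1)) 2)
  else
    -(PySem.Int.floordiv (-(l.length : Int)) 2)

def PlacePlayer (sd : List (List String)) (resw : Int) (resh : Int) : List (List String) :=
  let lst := sd
  match PySem.List.pyGet? lst (pvFindMiddle lst - 1) with
  | none => []  -- IndexError (only when sd = []), excluded by Pre_
  | some row =>
    -- int(findMiddle(row)/2): findMiddle ≥ 0, so int() truncation = floor division
    let idx := PySem.Int.floordiv (pvFindMiddle row) 2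
    let r := row.foldl (fun (st : List String × Int) i =>
      (if (some i == PySem.List.pyGet? row idx) && (st.2 == idx + 2)
       then st.1 ++ ["@"] else st.1 ++ [i], st.2 + 1)) ([], 0)
    PySem.List.pySetD lst (pvFindMiddle lst - 1) r.1

-- ===== PORT B =====
def PlacePlayer_alt (sd : List (List String)) (resw : Int) (resh : Int) : List (List String) :=
  let mid := pvFindMiddle sd - 1
  match PySem.List.pyGet? sd mid with
  | none => []  -- IndexError (only when sd = []), excluded by Pre_
  | some row =>
    let m := PySem.Int.floordiv (pvFindMiddle row) 2
    let tstr := row   -- list(row): a copy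
    let tstr := if (decide (m + 2 < (row.length : Int))) &&
                   (PySem.List.pyGet? row (m + 2) == PySem.List.pyGet? row m)
                then PySem.List.pySetD tstr (m + 2) "@" else tstr
    PySem.List.pySetD sd mid tstr

-- ===== PRECONDITION & SPEC =====
-- Pre_ excludes exactly sd = [], where Python A (and B) raise IndexError on sd[-1].
def Pre_PlacePlayer (sd : List (List String)) (resw : Int) (resh : Int) : Prop := sd ≠ []
instance (sd : List (List String)) (resw : Int) (resh : Int) : Decidable (Pre_PlacePlayer sd resw resh) := by unfold Pre_PlacePlayer; infer_instance
def pvWitness_PlacePlayer : List (List String) × Int × Int := ([["a", "b", "a"], ["."]], 3, 2)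

def Spec_PlacePlayer (sd : List (List String)) (resw : Int) (resh : Int) (out : List (List String)) : Prop := out = PlacePlayer_alt sd resw resh
instance (sd : List (List String)) (resw : Int) (resh : Int) (out : List (List String)) : Decidable (Spec_PlacePlayer sd resw resh out) := by unfold Spec_PlacePlayer; infer_instance

-- ===== CLAIM (what is proved, stated in full; the proofs are below) =====
def Claim_equal_PlacePlayer : Prop := ∀ (sd : List (List String)) (resw : Int) (resh : Int), Dom_PlacePlayer sd resw resh → Pre_PlacePlayer sd resw resh → Spec_PlacePlayer sd resw resh (PlacePlayer sd resw resh)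

-- ===== LEMMAS AND PROOFS =====

-- findMiddle computes len // 2
theorem pvFindMiddle_eq {α : Type} (l : List α) :
    pvFindMiddle l = ((l.length / 2 : Nat) : Int) := by
  unfold pvFindMiddle
  rw [PySem.Int.floordiv_eq_ediv_of_pos (by omega), PySem.Int.floordiv_eq_ediv_of_pos (by omega)]
  split_ifs <;> omega

-- A's accumulator loop, characterised: the only position the test can fire at is t - b.
theorem pvFoldA (ch : String) (t : Int) : ∀ (l acc : List String) (b : Int),
    (List.foldl (fun (st : List String × Int) i =>
      (if (i == ch) && (st.2 == t) then st.1 ++ ["@"] else st.1 ++ [i], st.2 + 1)) (acc, b) l).1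
    = if 0 ≤ t - b ∧ t - b < (l.length : Int) ∧ l.getD (t - b).toNat "" == ch
      then acc ++ l.set (t - b).toNat "@" else acc ++ l := by
  intro l
  induction l with
  | nil => intro acc b; simp
  | cons x xs ih =>
    intro acc b
    simp only [List.foldl_cons]
    rw [ih]
    by_cases hb : b = t
    · subst hb
      have h1 : ¬ (0 ≤ b - (b + 1)) := by omega
      have h2 : (b - b).toNat = 0 := by omega
      rw [if_neg (by rintro ⟨p, -⟩; omega)]
      simp only [sub_self, Int.toNat_zero, List.getD_cons_zero, List.set_cons_zero,
        List.length_cons]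
      by_cases hx : (x == ch) = true
      · rw [if_pos (show (x == ch && (b == b)) = true by simp [hx]),
            if_pos ⟨by omega, by omega, hx⟩]
        simp
      · rw [if_neg (by simp [hx]), if_neg (by rintro ⟨-, -, p⟩; exact hx p)]
        simp
    · have hbt : (b == t) = false := by simp [hb]
      simp only [hbt, Bool.and_false, if_neg Bool.false_ne_true]
      by_cases hge : b + 1 ≤ t
      · have he : (t - b).toNat = (t - (b + 1)).toNat + 1 := by omega
        rw [he]
        simp only [List.getD_cons_succ, List.set_cons_succ, List.length_cons]
        split_ifs with h1 h2 h2
        · simp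
        · exact absurd ⟨by omega, by omega, h1.2.2⟩ h2
        · exact absurd ⟨by omega, by omega, h2.2.2⟩ h1
        · simp
      · rw [if_neg (by rintro ⟨p, -⟩; omega), if_neg (by rintro ⟨p, -⟩; omega)]
        simp

theorem PlacePlayer_eq_alt (sd : List (List String)) (resw resh : Int) :
    PlacePlayer sd resw resh = PlacePlayer_alt sd resw resh := by
  unfold PlacePlayer PlacePlayer_alt
  cases hg : PySem.List.pyGet? sd (pvFindMiddle sd - 1) with
  | none => simp only [hg]
  | some row =>
    simp only [hg]
    congr 1
    rcases row with _ | ⟨x, xs⟩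
    · -- empty row: the loop never runs, and B's guard m+2 < 0 is false
      have hm : PySem.Int.floordiv (pvFindMiddle ([] : List String)) 2 = 0 := by
        rw [pvFindMiddle_eq]
        rw [PySem.Int.floordiv_eq_ediv_of_pos (by omega)]
        simp
      rw [hm]
      split_ifs <;> rfl
    · set row := x :: xs with hrow
      have hlen : 1 ≤ row.length := by simp [hrow]
      set idx : Int := PySem.Int.floordiv (pvFindMiddle row) 2 with hidx
      have hidxeq : idx = ((row.length / 2 / 2 : Nat) : Int) := by
        rw [hidx, pvFindMiddle_eq, PySem.Int.floordiv_eq_ediv_of_pos (by omega)]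
        omega
      have hidx0 : 0 ≤ idx := by rw [hidxeq]; positivity
      have hidxlt : idx < (row.length : Int) := by
        rw [hidxeq]
        have : row.length / 2 / 2 < row.length := by omega
        exact_mod_cast this
      have hget : PySem.List.pyGet? row idx = some (row.getD idx.toNat "") := by
        rw [PySem.List.pyGet?_of_nonneg row hidx0,
            List.getElem?_eq_getElem (by omega), List.getD_eq_getElem _ _ (by omega)]
      set ch := row.getD idx.toNat "" with hch
      have hstep : (fun (st : List String × Int) i =>
          (if (some i == PySem.List.pyGet? row idx) && (st.2 == idx + 2)
           then st.1 ++ ["@"] else st.1 ++ [i], st.2 + 1))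
        = (fun (st : List String × Int) i =>
          (if (i == ch) && (st.2 == idx + 2) then st.1 ++ ["@"] else st.1 ++ [i], st.2 + 1)) := by
        funext st i
        rw [hget]
        simp only [Option.some_beq_some]
        rfl
      rw [hstep, pvFoldA ch (idx + 2) row [] 0]
      simp only [sub_zero, List.nil_append]
      by_cases hr : idx + 2 < (row.length : Int)
      · have hget2 : PySem.List.pyGet? row (idx + 2) = some (row.getD (idx + 2).toNat "") := by
          rw [PySem.List.pyGet?_of_nonneg row (show (0:Int) ≤ idx + 2 by omega),
              List.getElem?_eq_getElem (by omega), List.getD_eq_getElem _ _ (by omega)]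
        rw [hget, hget2]
        by_cases hceq : (row.getD (idx + 2).toNat "" == ch) = true
        · rw [if_pos ⟨by omega, hr, hceq⟩,
              if_pos (show _ by rw [Bool.and_eq_true, decide_eq_true_eq]; exact ⟨hr, by simpa using hceq⟩),
              PySem.List.pySetD_of_nonneg row "@" (show (0:Int) ≤ idx + 2 by omega)]
        · rw [if_neg (by rintro ⟨-, -, p⟩; exact hceq p),
              if_neg (by rw [Bool.and_eq_true, decide_eq_true_eq]; rintro ⟨-, p⟩; exact hceq (by simpa using p))]
      · rw [if_neg (by rintro ⟨-, p, -⟩; omega),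
            if_neg (by rw [Bool.and_eq_true, decide_eq_true_eq]; rintro ⟨p, -⟩; omega)]

-- ===== VERDICT (by name: the statement is the Claim_ definition above) =====
theorem PlacePlayer_spec : Claim_equal_PlacePlayer := by
  intro sd resw resh _ _
  unfold Spec_PlacePlayer
  exact PlacePlayer_eq_alt sd resw resh
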